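-- pv_equiv track=rewrite | github.com/jki14/competitive-programming | 2020/withgoogle.com/codejam/round1c/proc.py | solution
-- ===== SOURCE A (Python) =====
-- def solution(a, m):
--     n = len(a)
--     c = { }
--     for d in a:
--         if d not in c:
--             c[d] = 1
--         else:
--             c[d] = c[d] + 1
--     bar = [c[k] for k in sorted(c.keys())]
--     foo = m - 1
--     if [i for i in bar if i >= m]:
--         foo = 0
--     elif [i for i in bar[:-1] if i >= m - 1]:
--         foo = 1
--     elif m == 3 and [ k for k in c.keys() if k * 2 in c]:
--         foo = 1
--     return foo
-- ===== SOURCE B (Python) =====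
-- def solution(a, m):
--     # sort-then-scan: run-length scan of the sorted list replaces the dict of counts;
--     # the m==3 doubling test is a two-pointer sweep over the sorted list.
--     s = sorted(a)
--     if not s:
--         return m - 1
--     prev = None
--     cur = 0
--     prevmax = 0
--     for x in s:
--         if prev == x:
--             cur += 1
--         else:
--             prevmax = max(prevmax, cur)
--             cur = 1
--             prev = x
--     # cur = multiplicity of the largest value, prevmax = largest multiplicity among the rest
--     if cur >= m or prevmax >= m:
--         return 0
--     if prevmax >= m - 1:
--         return 1
--     if m == 3:
--         n = len(s)
--         j = 0
--         for i in range(n):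
--             t = s[i] * 2
--             while j < n and s[j] < t:
--                 j += 1
--             if j < n and s[j] == t:
--                 return 1
--     return m - 1
-- ===== Notes on version B (the rewrite author's own statement) =====
-- stated objective: alternative
-- what changed: B drops the hash-map-of-counts-plus-sorted-keys approach entirely: it sorts the list itself and classifies it with a single run-length scan (current run length = multiplicity of the maximum value, running max of closed runs = best multiplicity among the other values), and replaces the dict-membership doubling test by a two-pointer sweep over the sorted list instead of hash lookups.
import Mathlib
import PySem

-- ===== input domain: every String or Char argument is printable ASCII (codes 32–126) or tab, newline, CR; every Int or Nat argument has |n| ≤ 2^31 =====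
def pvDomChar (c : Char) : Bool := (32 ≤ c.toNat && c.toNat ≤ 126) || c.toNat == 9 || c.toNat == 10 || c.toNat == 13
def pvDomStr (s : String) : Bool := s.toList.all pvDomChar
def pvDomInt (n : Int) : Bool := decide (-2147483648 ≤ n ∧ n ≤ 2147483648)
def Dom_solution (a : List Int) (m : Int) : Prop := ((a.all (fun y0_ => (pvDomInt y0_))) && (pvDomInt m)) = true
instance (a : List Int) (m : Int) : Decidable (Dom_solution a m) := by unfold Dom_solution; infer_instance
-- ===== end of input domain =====

-- B replaces A's dict of counts + sort of the distinct keys by a run-length scan of the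
-- sorted list itself, and A's hash-lookup doubling test by a two-pointer sweep; objective: alternative.

-- ===== PORT A =====
def solution (a : List Int) (m : Int) : Int :=
  let _n : Int := (a.length : Int)
  let c : PySem.Dict Int Int := a.foldl
    (fun c d => if c.contains d = false then c.insert d 1
                else c.insert d (c.getD d 0 + 1)) PySem.Dict.empty
  -- c[k] is exact as getD: every k comes from c.keys
  let bar : List Int := (PySem.List.sorted c.keys (fun k => k) false).map (fun k => c.getD k 0)
  let foo := m - 1
  if (bar.filter fun i => decide (i ≥ m)) ≠ [] then 0
  else if ((PySem.List.slice bar none (some (-1))).filter fun i => decide (i ≥ m - 1)) ≠ [] then 1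
  else if m = 3 ∧ (c.keys.filter fun k => c.contains (k * 2)) ≠ [] then 1
  else foo

-- ===== PORT B =====
-- the run-length scan step: state = (prev, cur, prevmax)
def pvStep (st : Option Int × Int × Int) (x : Int) : Option Int × Int × Int :=
  if st.1 = some x then (st.1, st.2.1 + 1, st.2.2)
  else (some x, 1, max st.2.2 st.2.1)

-- the two-pointer doubling sweep of Source B: first list = remaining i-suffix (targets 2*x),
-- second list = remaining j-suffix; the inner 'while s[j] < t: j += 1' is the first branch
def pvDbl : List Int → List Int → Bool
  | [], _ => false
  | _ :: _, [] => false
  | x :: ts, y :: js =>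
    if y < 2 * x then pvDbl (x :: ts) js
    else if y = 2 * x then true
    else pvDbl ts (y :: js)
termination_by ts js => ts.length + js.length

def solution_alt (a : List Int) (m : Int) : Int :=
  let s := PySem.List.sorted a (fun x => x) false
  if s = [] then m - 1
  else
    let st := s.foldl pvStep (none, 0, 0)
    if st.2.1 ≥ m ∨ st.2.2 ≥ m then 0
    else if st.2.2 ≥ m - 1 then 1
    else if m = 3 ∧ pvDbl s s = true then 1
    else m - 1

-- ===== PRECONDITION & SPEC =====
def Spec_solution (a : List Int) (m : Int) (out : Int) : Prop := out = solution_alt a m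
instance (a : List Int) (m : Int) (out : Int) : Decidable (Spec_solution a m out) := by unfold Spec_solution; infer_instance

-- ===== CLAIM (what is proved, stated in full; the proofs are below) =====
def Claim_equal_solution : Prop := ∀ (a : List Int) (m : Int), Dom_solution a m → Spec_solution a m (solution a m)

-- ===== LEMMAS AND PROOFS =====

-- the three abstract conditions both programs decide
abbrev pvC1 (a : List Int) (m : Int) : Prop := ∃ x ∈ a, (a.count x : Int) ≥ m
abbrev pvC2 (a : List Int) (m : Int) : Prop := ∃ x ∈ a, (∃ y ∈ a, x < y) ∧ (a.count x : Int) ≥ m - 1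
abbrev pvC3 (a : List Int) : Prop := ∃ x ∈ a, 2 * x ∈ a

def pvAbs (a : List Int) (m : Int) : Int :=
  if pvC1 a m then 0 else if pvC2 a m then 1 else if m = 3 ∧ pvC3 a then 1 else m - 1

theorem modify_eq_insert (c : PySem.Dict Int Int) (k : Int) :
    c.modify k 0 (· + 1) = c.insert k (c.getD k 0 + 1) := by
  simp [PySem.Dict.modify, PySem.Dict.insert, PySem.Dict.getD]

theorem stepA_eq (c : PySem.Dict Int Int) (d : Int) :
    (if c.contains d = false then c.insert d 1 else c.insert d (c.getD d 0 + 1)) = c.modify d 0 (· + 1) := by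
  rw [modify_eq_insert]
  by_cases h : c.contains d = false
  · have h0 : c.getD d 0 = 0 := PySem.Dict.getD_of_not_contains c 0 h
    rw [h0]; simp
  · simp [h]

theorem filter_ne_nil_iff (l : List Int) (p : Int → Bool) :
    l.filter p ≠ [] ↔ ∃ x ∈ l, p x = true := by
  rw [Ne, List.filter_eq_nil_iff]
  push Not
  simp

theorem last_is_max (p : List Int) (hp : p.Pairwise (· ≤ ·)) (h : p ≠ []) :
    ∀ y ∈ p, y ≤ p.getLast h := by
  induction p with
  | nil => exact absurd rfl h
  | cons a t ih =>
      intro y hy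
      rcases List.pairwise_cons.mp hp with ⟨ha, ht⟩
      cases t with
      | nil =>
          simp at hy
          simp [hy]
      | cons b u =>
          rw [List.getLast_cons (by simp : (b :: u) ≠ [])]
          rcases List.mem_cons.mp hy with rfl | hy
          · exact ha _ (List.getLast_mem _)
          · exact ih ht (by simp) y hy

theorem dropLast_sorted_ofList_mem (a : List Int) (k : Int) :
    k ∈ (PySem.List.sorted (PySem.Set.ofList a) (fun x => x) false).dropLast ↔
      k ∈ a ∧ ∃ y ∈ a, k < y := by
  set S := PySem.List.sorted (PySem.Set.ofList a) (fun x => x) false with hS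
  have hmemS : ∀ x : Int, x ∈ S ↔ x ∈ a := by
    intro x
    rw [hS, PySem.List.mem_sorted]
    exact PySem.Set.mem_ofList a x
  have hlt : S.Pairwise (· < ·) := by rw [hS]; exact PySem.List.sorted_ofList_pairwise_lt a
  by_cases hSe : S = []
  · constructor
    · intro hk; rw [hSe] at hk; simp at hk
    · rintro ⟨hk, -⟩
      exact absurd ((hmemS k).mpr hk) (by rw [hSe]; simp)
  · set L := S.getLast hSe with hL
    have hdec : S.dropLast ++ [L] = S := List.dropLast_append_getLast hSe
    have hcross : ∀ x ∈ S.dropLast, x < L := by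
      have := hdec ▸ hlt
      rcases List.pairwise_append.mp this with ⟨-, -, hx⟩
      intro x hx'
      exact hx x hx' L (by simp)
    constructor
    · intro hk
      have hkS : k ∈ S := by rw [← hdec]; exact List.mem_append_left _ hk
      exact ⟨(hmemS k).mp hkS, L, (hmemS L).mp (List.getLast_mem hSe), hcross k hk⟩
    · rintro ⟨hk, y, hy, hky⟩
      have hkS : k ∈ S.dropLast ++ [L] := by rw [hdec]; exact (hmemS k).mpr hk
      rcases List.mem_append.mp hkS with h | h
      · exact h
      · exfalso
        have hkL : k = L := by simpa using h
        have hyS : y ∈ S.dropLast ++ [L] := by rw [hdec]; exact (hmemS y).mpr hy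
        rcases List.mem_append.mp hyS with h' | h'
        · exact absurd (hcross y h') (by omega)
        · have : y = L := by simpa using h'
          omega

theorem solution_eq_abs (a : List Int) (m : Int) : solution a m = pvAbs a m := by
  have hstep : (fun (c : PySem.Dict Int Int) (d : Int) =>
      if c.contains d = false then c.insert d 1 else c.insert d (c.getD d 0 + 1)) =
      (fun (c : PySem.Dict Int Int) (d : Int) => c.modify d 0 (· + 1)) :=
    funext fun c => funext fun d => stepA_eq c d
  have hfold : a.foldl (fun (c : PySem.Dict Int Int) (d : Int) =>
      if c.contains d = false then c.insert d 1 else c.insert d (c.getD d 0 + 1)) PySem.Dict.empty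
      = PySem.Dict.counter a := by
    rw [hstep]; rfl
  unfold solution
  simp only [hfold, PySem.Dict.keys_counter]
  have h1 : (((PySem.List.sorted (PySem.Set.ofList a) (fun k => k) false).map
        (fun k => (PySem.Dict.counter a).getD k 0)).filter (fun i => decide (i ≥ m)) ≠ []) ↔ pvC1 a m := by
    rw [filter_ne_nil_iff]
    simp only [List.mem_map, PySem.Dict.getD_counter, PySem.List.mem_sorted, decide_eq_true_eq]
    constructor
    · rintro ⟨i, ⟨k, hk, rfl⟩, hp⟩
      exact ⟨k, (PySem.Set.mem_ofList a k).mp hk, hp⟩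
    · rintro ⟨x, hx, hp⟩
      exact ⟨_, ⟨x, (PySem.Set.mem_ofList a x).mpr hx, rfl⟩, hp⟩
  have h2 : ((PySem.List.slice ((PySem.List.sorted (PySem.Set.ofList a) (fun k => k) false).map
        (fun k => (PySem.Dict.counter a).getD k 0)) none (some (-1))).filter
        (fun i => decide (i ≥ m - 1)) ≠ []) ↔ pvC2 a m := by
    rw [PySem.List.slice_to_neg_one, ← List.map_dropLast, filter_ne_nil_iff]
    simp only [List.mem_map, PySem.Dict.getD_counter, decide_eq_true_eq]
    constructor
    · rintro ⟨i, ⟨k, hk, rfl⟩, hp⟩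
      rcases (dropLast_sorted_ofList_mem a k).mp hk with ⟨hka, hy⟩
      exact ⟨k, hka, hy, hp⟩
    · rintro ⟨x, hx, hy, hp⟩
      exact ⟨_, ⟨x, (dropLast_sorted_ofList_mem a x).mpr ⟨hx, hy⟩, rfl⟩, hp⟩
  have h3 : ((PySem.Set.ofList a : List Int).filter
        (fun k => (PySem.Dict.counter a).contains (k * 2)) ≠ []) ↔ pvC3 a := by
    rw [filter_ne_nil_iff]
    simp only [PySem.Dict.contains_counter]
    constructor
    · rintro ⟨k, hk, hp⟩
      exact ⟨k, (PySem.Set.mem_ofList a k).mp hk, by simpa [mul_comm] using hp⟩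
    · rintro ⟨x, hx, hp⟩
      exact ⟨x, (PySem.Set.mem_ofList a x).mpr hx, by simpa [mul_comm] using hp⟩
  rw [pvAbs]
  simp only [h1, h2, h3]

theorem count_append_singleton (p : List Int) (x v : Int) :
    (p ++ [x]).count v = p.count v + if v = x then 1 else 0 := by
  rw [List.count_append]
  by_cases h : v = x
  · simp [h]
  · simp [h, Ne.symm h]

theorem pvStep_pos (st : Option Int × Int × Int) (x : Int) (h : st.1 = some x) :
    pvStep st x = (st.1, st.2.1 + 1, st.2.2) := by
  unfold pvStep; rw [if_pos h]

theorem pvStep_neg (st : Option Int × Int × Int) (x : Int) (h : ¬ st.1 = some x) :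
    pvStep st x = (some x, 1, max st.2.2 st.2.1) := by
  unfold pvStep; rw [if_neg h]

theorem pvStep_inv (p : List Int) (hp : p.Pairwise (· ≤ ·)) (h : p ≠ []) :
    (p.foldl pvStep (none, 0, 0)).1 = some (p.getLast h) ∧
    (p.foldl pvStep (none, 0, 0)).2.1 = (p.count (p.getLast h) : Int) ∧
    0 ≤ (p.foldl pvStep (none, 0, 0)).2.2 ∧
    ∀ t : Int, ((p.foldl pvStep (none, 0, 0)).2.2 ≥ t ↔
      t ≤ 0 ∨ ∃ v ∈ p, v ≠ p.getLast h ∧ (p.count v : Int) ≥ t) := by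
  induction p using List.reverseRecOn with
  | nil => exact absurd rfl h
  | append_singleton p x ih =>
      rcases List.pairwise_append.mp hp with ⟨hpp, -, hcross⟩
      have hlex : ∀ y ∈ p, y ≤ x := fun y hy => hcross y hy x (by simp)
      have hlast : (p ++ [x]).getLast h = x := List.getLast_concat ..
      rw [hlast]
      by_cases hpe : p = []
      · subst hpe
        simp only [List.nil_append, List.foldl_cons, List.foldl_nil, pvStep]
        refine ⟨by simp, by simp, by simp, fun t => ?_⟩
        simp only [List.mem_singleton]
        constructor
        · intro ht; left; simpa using ht
        · rintro (ht | ⟨v, rfl, hv, -⟩)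
          · simpa using ht
          · exact absurd rfl hv
      · have hpne : p ≠ [] := hpe
        obtain ⟨i1, i2, i3, i4⟩ := ih hpp hpne
        set L := p.getLast hpne with hL
        have hLp : L ∈ p := List.getLast_mem hpne
        have hLmax : ∀ y ∈ p, y ≤ L := last_is_max p hpp hpne
        rw [List.foldl_append, List.foldl_cons, List.foldl_nil]
        by_cases hxL : x = L
        · -- same run continues
          have hcond : (p.foldl pvStep (none, 0, 0)).1 = some x := by rw [i1, hxL]
          rw [pvStep_pos _ _ hcond]
          dsimp only
          refine ⟨hcond, ?_, i3, fun t => ?_⟩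
          · rw [i2, List.count_append, ← hxL]
            push_cast
            simp
          · rw [i4 t]
            constructor
            · rintro (ht | ⟨v, hv, hvL, hc⟩)
              · exact Or.inl ht
              · refine Or.inr ⟨v, List.mem_append_left _ hv, by rw [hxL]; exact hvL, ?_⟩
                have hne : v ≠ x := by rw [hxL]; exact hvL
                rw [count_append_singleton, if_neg hne]
                push_cast
                omega
            · rintro (ht | ⟨v, hv, hvx, hc⟩)
              · exact Or.inl ht
              · have hvp : v ∈ p := by
                  rcases List.mem_append.mp hv with h' | h'
                  · exact h'
                  · exact absurd (by simpa using h') hvx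
                refine Or.inr ⟨v, hvp, by rw [← hxL]; exact hvx, ?_⟩
                rw [count_append_singleton, if_neg hvx] at hc
                push_cast at hc
                omega
        · -- a new, strictly larger run starts
          have hxnp : x ∉ p := by
            intro hxp
            have h1 := hLmax x hxp
            have h2 := hlex L hLp
            exact hxL (le_antisymm h1 h2)
          have hcond : (p.foldl pvStep (none, 0, 0)).1 ≠ some x := by
            rw [i1]
            simp
            intro hq
            exact hxL hq.symm
          rw [pvStep_neg _ _ hcond]
          dsimp only
          refine ⟨rfl, ?_, ?_, fun t => ?_⟩
          · rw [count_append_singleton, if_pos rfl]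
            have h0 : p.count x = 0 := List.count_eq_zero.mpr hxnp
            rw [h0]
            simp
          · exact le_trans i3 (le_max_left _ _)
          · rw [ge_iff_le, le_max_iff, ← ge_iff_le, ← ge_iff_le, i4 t, i2]
            constructor
            · rintro ((ht | ⟨v, hv, hvL, hc⟩) | hcL)
              · exact Or.inl ht
              · refine Or.inr ⟨v, List.mem_append_left _ hv, ?_, ?_⟩
                · intro hvx; rw [hvx] at hv; exact hxnp hv
                · have hvx : v ≠ x := by intro hvx; rw [hvx] at hv; exact hxnp hv
                  rw [count_append_singleton, if_neg hvx]
                  push_cast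
                  omega
              · refine Or.inr ⟨L, List.mem_append_left _ hLp, ?_, ?_⟩
                · intro hLx; exact hxL hLx.symm
                · have hLx : L ≠ x := fun hq => hxL hq.symm
                  rw [count_append_singleton, if_neg hLx]
                  push_cast
                  omega
            · rintro (ht | ⟨v, hv, hvx, hc⟩)
              · exact Or.inl (Or.inl ht)
              · have hvp : v ∈ p := by
                  rcases List.mem_append.mp hv with h' | h'
                  · exact h'
                  · exact absurd (by simpa using h') hvx
                have hcv : (p.count v : Int) ≥ t := by
                  rw [count_append_singleton, if_neg hvx] at hc
                  push_cast at hc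
                  omega
                by_cases hvL : v = L
                · right; rw [← hvL]; exact hcv
                · left; exact Or.inr ⟨v, hvp, hvL, hcv⟩

theorem pvDbl_iff (ts js : List Int) (hts : ts.Pairwise (· ≤ ·)) (hjs : js.Pairwise (· ≤ ·)) :
    pvDbl ts js = true ↔ ∃ x ∈ ts, 2 * x ∈ js := by
  induction ts, js using pvDbl.induct with
  | case1 js => simp [pvDbl]
  | case2 x ts => simp [pvDbl]
  | case3 x ts y js hlt ih =>
      rcases List.pairwise_cons.mp hjs with ⟨hy, hjs'⟩
      rw [pvDbl, if_pos hlt, ih hts hjs']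
      constructor
      · rintro ⟨z, hz, hzm⟩
        exact ⟨z, hz, List.mem_cons_of_mem _ hzm⟩
      · rintro ⟨z, hz, hzm⟩
        refine ⟨z, hz, ?_⟩
        rcases List.mem_cons.mp hzm with h' | h'
        · exfalso
          have hxz : x ≤ z := by
            rcases List.mem_cons.mp hz with rfl | hz'
            · exact le_refl _
            · exact (List.pairwise_cons.mp hts).1 z hz'
          omega
        · exact h'
  | case4 x ts js hlt =>
      rw [pvDbl, if_neg hlt, if_pos rfl]
      simp only [true_iff]
      exact ⟨x, List.mem_cons_self .., List.mem_cons_self ..⟩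
  | case5 x ts y js hlt heq ih =>
      rcases List.pairwise_cons.mp hts with ⟨hx, hts'⟩
      rw [pvDbl, if_neg hlt, if_neg heq, ih hts' hjs]
      constructor
      · rintro ⟨z, hz, hzm⟩
        exact ⟨z, List.mem_cons_of_mem _ hz, hzm⟩
      · rintro ⟨z, hz, hzm⟩
        rcases List.mem_cons.mp hz with rfl | h'
        · exfalso
          have : ∀ w ∈ y :: js, y ≤ w := by
            intro w hw
            rcases List.mem_cons.mp hw with rfl | hw'
            · exact le_refl _
            · exact (List.pairwise_cons.mp hjs).1 w hw'
          have := this _ hzm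
          omega
        · exact ⟨z, h', hzm⟩

theorem solution_alt_eq_abs (a : List Int) (m : Int) : solution_alt a m = pvAbs a m := by
  unfold solution_alt
  dsimp only
  have hperm : (PySem.List.sorted a (fun x => x) false).Perm a := PySem.List.sorted_perm ..
  set s := PySem.List.sorted a (fun x => x) false with hs
  have hmem : ∀ x : Int, x ∈ s ↔ x ∈ a := fun x => hperm.mem_iff
  have hcnt : ∀ x : Int, s.count x = a.count x := fun x => hperm.count_eq x
  have hsp : s.Pairwise (· ≤ ·) := by
    rw [hs]
    have := PySem.List.sorted_pairwise (xs := a) (key := fun x : Int => x)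
    simpa using this
  by_cases hse : s = []
  · have ha : a = [] := (hse ▸ hperm.symm).eq_nil
    rw [if_pos hse]
    subst ha
    simp [pvAbs, pvC1, pvC2, pvC3]
  · obtain ⟨i1, i2, i3, i4⟩ := pvStep_inv s hsp hse
    have hLs : s.getLast hse ∈ s := List.getLast_mem hse
    have hLmax : ∀ y ∈ s, y ≤ s.getLast hse := last_is_max s hsp hse
    have hLcnt : (1 : Int) ≤ (a.count (s.getLast hse) : Int) := by
      exact_mod_cast List.count_pos_iff.mpr ((hmem _).mp hLs)
    rw [if_neg hse]
    have hb1 : ((s.foldl pvStep (none, 0, 0)).2.1 ≥ m ∨ (s.foldl pvStep (none, 0, 0)).2.2 ≥ m) ↔ pvC1 a m := by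
      constructor
      · rintro (h | h)
        · refine ⟨s.getLast hse, (hmem _).mp hLs, ?_⟩
          rw [i2, hcnt] at h
          exact h
        · rcases (i4 m).mp h with ht | ⟨v, hv, hvL, hc⟩
          · exact ⟨s.getLast hse, (hmem _).mp hLs, by omega⟩
          · exact ⟨v, (hmem v).mp hv, by rw [← hcnt]; exact hc⟩
      · rintro ⟨x, hx, hc⟩
        by_cases hxL : x = s.getLast hse
        · left
          rw [i2, hcnt, ← hxL]
          exact hc
        · right
          exact (i4 m).mpr (Or.inr ⟨x, (hmem x).mpr hx, hxL, by rw [hcnt]; exact hc⟩)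
    by_cases hC1 : pvC1 a m
    · rw [if_pos (hb1.mpr hC1), pvAbs, if_pos hC1]
    · rw [if_neg (fun h => hC1 (hb1.mp h))]
      have hm2 : 2 ≤ m := by
        by_contra hm
        exact hC1 ⟨s.getLast hse, (hmem _).mp hLs, by omega⟩
      have hb2 : ((s.foldl pvStep (none, 0, 0)).2.2 ≥ m - 1) ↔ pvC2 a m := by
        rw [i4 (m - 1)]
        constructor
        · rintro (ht | ⟨v, hv, hvL, hc⟩)
          · exact absurd ht (by omega)
          · refine ⟨v, (hmem v).mp hv,
              ⟨s.getLast hse, (hmem _).mp hLs, lt_of_le_of_ne (hLmax v hv) hvL⟩,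
              by rw [← hcnt]; exact hc⟩
        · rintro ⟨x, hx, ⟨y, hy, hxy⟩, hc⟩
          right
          refine ⟨x, (hmem x).mpr hx, ?_, by rw [hcnt]; exact hc⟩
          intro hxL
          have := hLmax y ((hmem y).mpr hy)
          omega
      by_cases hC2 : pvC2 a m
      · rw [if_pos (hb2.mpr hC2), pvAbs, if_neg hC1, if_pos hC2]
      · rw [if_neg (fun h => hC2 (hb2.mp h))]
        have hb3 : (m = 3 ∧ pvDbl s s = true) ↔ (m = 3 ∧ pvC3 a) := by
          rw [pvDbl_iff s s hsp hsp]
          constructor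
          · rintro ⟨h3, x, hx, hm⟩
            exact ⟨h3, x, (hmem x).mp hx, (hmem _).mp hm⟩
          · rintro ⟨h3, x, hx, hm⟩
            exact ⟨h3, x, (hmem x).mpr hx, (hmem _).mpr hm⟩
        by_cases hC3 : m = 3 ∧ pvC3 a
        · rw [if_pos (hb3.mpr hC3), pvAbs, if_neg hC1, if_neg hC2, if_pos hC3]
        · rw [if_neg (fun h => hC3 (hb3.mp h)), pvAbs, if_neg hC1, if_neg hC2, if_neg hC3]

-- ===== VERDICT (by name: the statement is the Claim_ definition above) =====
theorem solution_spec : Claim_equal_solution := by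
  intro a m _
  unfold Spec_solution
  rw [solution_eq_abs, solution_alt_eq_abs]
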